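-- pv_equiv track=rewrite | github.com/alexlimatds/bracis_2023 | cohan_models.py | enforce_max_sent_per_chunk
-- ===== SOURCE A (Python) =====
-- def enforce_max_sent_per_chunk(sentences, labels, max_sent_per_chunk):
--     """
--     Splits a document with goal to produce splits that are of almost
--     equal size to avoid the scenario where all splits are of size
--     max_n_sentences then the last split is 1 or 2 sentences.
--     This would result into losing context around the edges of each examples.
--     Code adapted from https://github.com/allenai/sequential_sentence_classification/blob/master/sequential_sentence_classification/dataset_reader.py
--     Arguments:
--         sentences (list of string): the sequence of sentences in a document.
--         labels (list of string): the labels of the sentences.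
--         max_sent_per_chunk (integer): the maximum number of sentences in a chunk
--             without taking the overlaped sentences in account.
--     Returns:
--         List of list of string. Each sublist represents a chunk and its elements are the
--         chunk's sentences.
--         List of list of string. Each sublist represents a chunk and its elements are the
--         labels of the sentences in the chunk.
--     """
--     assert len(sentences) == len(labels)
--
--     if len(sentences) > max_sent_per_chunk:
--         i = len(sentences) // 2
--         s1, l1 = enforce_max_sent_per_chunk(sentences[:i], labels[:i], max_sent_per_chunk)
--         s2, l2 = enforce_max_sent_per_chunk(sentences[i:], labels[i:], max_sent_per_chunk)
--         return s1 + s2, l1 + l2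
--     else:
--         return [sentences], [labels]
-- ===== SOURCE B (Python) =====
-- def enforce_max_sent_per_chunk(sentences, labels, max_sent_per_chunk):
--     assert len(sentences) == len(labels)
--
--     sizes = []
--
--     def add_chunk_sizes(n):
--         # index-only recursion: same halving as the original, but on the length
--         if n > max_sent_per_chunk:
--             i = n // 2
--             add_chunk_sizes(i)
--             add_chunk_sizes(n - i)
--         else:
--             sizes.append(n)
--
--     add_chunk_sizes(len(sentences))
--     s_chunks = []
--     l_chunks = []
--     pos = 0
--     for sz in sizes:
--         s_chunks.append(sentences[pos:pos + sz])
--         l_chunks.append(labels[pos:pos + sz])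
--         pos += sz
--     return s_chunks, l_chunks
-- ===== Notes on version B (the rewrite author's own statement) =====
-- stated objective: alternative
-- what changed: B computes the chunk sizes by index-only recursion on the length and then slices each chunk out of the input once in a single pass, instead of recursively copying both list halves at every level of the recursion.
import Mathlib
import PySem

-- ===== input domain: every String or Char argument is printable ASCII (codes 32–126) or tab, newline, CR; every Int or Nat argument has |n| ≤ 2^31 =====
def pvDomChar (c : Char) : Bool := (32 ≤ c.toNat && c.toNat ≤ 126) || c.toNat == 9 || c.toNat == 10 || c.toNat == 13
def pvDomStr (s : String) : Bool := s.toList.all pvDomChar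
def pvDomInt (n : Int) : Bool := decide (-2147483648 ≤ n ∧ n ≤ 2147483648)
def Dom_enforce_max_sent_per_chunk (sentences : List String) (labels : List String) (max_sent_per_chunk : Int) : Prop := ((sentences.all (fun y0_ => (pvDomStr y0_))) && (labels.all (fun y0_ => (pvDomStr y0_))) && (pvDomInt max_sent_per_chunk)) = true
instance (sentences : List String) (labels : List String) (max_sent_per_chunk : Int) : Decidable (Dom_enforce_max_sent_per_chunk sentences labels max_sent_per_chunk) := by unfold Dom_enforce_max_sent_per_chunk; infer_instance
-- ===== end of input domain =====

-- B computes split sizes by index-only recursion on the length, then slices each chunk out of the input once;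
-- equivalence is on the return value only (neither program mutates its arguments).

-- ===== PORT A =====
-- fuel makes the recursion total; under Pre_ the fuel (length + 1) is never exhausted
def pvGoA (fuel : Nat) (sentences labels : List String) (max_sent_per_chunk : Int) :
    List (List String) × List (List String) :=
  match fuel with
  | 0 => ([], [])
  | f + 1 =>
    if (sentences.length : Int) > max_sent_per_chunk then
      let i : Int := PySem.Int.floordiv (sentences.length : Int) 2
      let r1 := pvGoA f (PySem.List.slice sentences none (some i)) (PySem.List.slice labels none (some i)) max_sent_per_chunk
      let r2 := pvGoA f (PySem.List.slice sentences (some i) none) (PySem.List.slice labels (some i) none) max_sent_per_chunk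
      (r1.1 ++ r2.1, r1.2 ++ r2.2)
    else
      ([sentences], [labels])

def enforce_max_sent_per_chunk (sentences : List String) (labels : List String) (max_sent_per_chunk : Int) : List (List String) × List (List String) :=
  pvGoA (sentences.length + 1) sentences labels max_sent_per_chunk

-- ===== PORT B =====
-- fuel makes the recursion total; under Pre_ the fuel (length + 1) is never exhausted;
-- acc models the shared 'sizes' list that add_chunk_sizes appends to
def pvSizesAcc (fuel : Nat) (n max_sent_per_chunk : Int) (acc : List Int) : List Int :=
  match fuel with
  | 0 => acc
  | f + 1 =>
    if n > max_sent_per_chunk then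
      let i : Int := PySem.Int.floordiv n 2
      pvSizesAcc f (n - i) max_sent_per_chunk (pvSizesAcc f i max_sent_per_chunk acc)
    else
      acc ++ [n]

-- the for-loop over sizes: positions pos, pos+sz advance left to right
def pvSliceBy (xs : List String) (pos : Int) (sizes : List Int) : List (List String) :=
  match sizes with
  | [] => []
  | sz :: rest => PySem.List.slice xs (some pos) (some (pos + sz)) :: pvSliceBy xs (pos + sz) rest

def enforce_max_sent_per_chunk_alt (sentences : List String) (labels : List String) (max_sent_per_chunk : Int) : List (List String) × List (List String) :=
  let sizes := pvSizesAcc (sentences.length + 1) (sentences.length : Int) max_sent_per_chunk []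
  (pvSliceBy sentences 0 sizes, pvSliceBy labels 0 sizes)

-- ===== PRECONDITION & SPEC =====
-- Pre_ excludes inputs where A raises: length mismatch (AssertionError) and
-- max_sent_per_chunk too small to terminate (RecursionError: n > max with n // 2 = 0 recurses forever).
def Pre_enforce_max_sent_per_chunk (sentences : List String) (labels : List String) (max_sent_per_chunk : Int) : Prop :=
  sentences.length = labels.length ∧ (1 ≤ max_sent_per_chunk ∨ (sentences.length : Int) ≤ max_sent_per_chunk)
instance (sentences : List String) (labels : List String) (max_sent_per_chunk : Int) : Decidable (Pre_enforce_max_sent_per_chunk sentences labels max_sent_per_chunk) := by unfold Pre_enforce_max_sent_per_chunk; infer_instance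

def pvWitness_enforce_max_sent_per_chunk : List String × List String × Int :=
  (["a", "b", "c", "d", "e"], ["x", "y", "z", "u", "v"], 2)

def Spec_enforce_max_sent_per_chunk (sentences : List String) (labels : List String) (max_sent_per_chunk : Int) (out : List (List String) × List (List String)) : Prop := out = enforce_max_sent_per_chunk_alt sentences labels max_sent_per_chunk
instance (sentences : List String) (labels : List String) (max_sent_per_chunk : Int) (out : List (List String) × List (List String)) : Decidable (Spec_enforce_max_sent_per_chunk sentences labels max_sent_per_chunk out) := by unfold Spec_enforce_max_sent_per_chunk; infer_instance

-- ===== CLAIM (what is proved, stated in full; the proofs are below) =====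
def Claim_equal_enforce_max_sent_per_chunk : Prop := ∀ (sentences : List String) (labels : List String) (max_sent_per_chunk : Int), Dom_enforce_max_sent_per_chunk sentences labels max_sent_per_chunk → Pre_enforce_max_sent_per_chunk sentences labels max_sent_per_chunk → Spec_enforce_max_sent_per_chunk sentences labels max_sent_per_chunk (enforce_max_sent_per_chunk sentences labels max_sent_per_chunk)

-- ===== LEMMAS AND PROOFS =====

-- clean take/drop formulation used as midpoint of the proof
def pvSplitN (xs : List String) (sizes : List Nat) : List (List String) :=
  match sizes with
  | [] => []
  | k :: ks => xs.take k :: pvSplitN (xs.drop k) ks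

theorem pvSplitN_append (xs : List String) (a b : List Nat) :
    pvSplitN xs (a ++ b) = pvSplitN xs a ++ pvSplitN (xs.drop a.sum) b := by
  induction a generalizing xs with
  | nil => simp [pvSplitN]
  | cons k ks ih => simp [pvSplitN, ih, List.drop_drop]

theorem pvSplitN_take (xs : List String) (sizes : List Nat) (j : Nat)
    (h : sizes.sum ≤ j) : pvSplitN (xs.take j) sizes = pvSplitN xs sizes := by
  induction sizes generalizing xs j with
  | nil => simp [pvSplitN]
  | cons k ks ih =>
    simp only [List.sum_cons] at h
    simp only [pvSplitN, List.take_take, List.drop_take]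
    rw [Nat.min_eq_left (by omega), ih _ (j - k) (by omega)]

-- proof-side reference: the sizes list without the accumulator
def pvSizesB (fuel : Nat) (n max_sent_per_chunk : Int) : List Int :=
  match fuel with
  | 0 => []
  | f + 1 =>
    if n > max_sent_per_chunk then
      let i : Int := PySem.Int.floordiv n 2
      pvSizesB f i max_sent_per_chunk ++ pvSizesB f (n - i) max_sent_per_chunk
    else
      [n]

theorem pvSizesAcc_eq (f : Nat) (n m : Int) (acc : List Int) :
    pvSizesAcc f n m acc = acc ++ pvSizesB f n m := by
  induction f generalizing n acc with
  | zero => simp [pvSizesAcc, pvSizesB]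
  | succ f ih =>
    by_cases h : n > m
    · simp only [pvSizesAcc, pvSizesB, if_pos h, ih, List.append_assoc]
    · simp [pvSizesAcc, pvSizesB, if_neg h]

theorem pvSum_toNat (zs : List Int) (hz : ∀ z ∈ zs, 0 ≤ z) :
    (((zs.map Int.toNat).sum : Nat) : Int) = zs.sum := by
  induction zs with
  | nil => simp
  | cons z zt ihz =>
    simp only [List.map_cons, List.sum_cons, Nat.cast_add]
    rw [ihz (fun a ha => hz a (by simp [ha]))]
    have := hz z (by simp); omega

theorem pvSizesB_nonneg (f : Nat) (n m : Int) (hm : 1 ≤ m) (hn : 0 ≤ n) (hf : n.toNat < f) :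
    (∀ sz ∈ pvSizesB f n m, 0 ≤ sz) ∧ (pvSizesB f n m).sum = n := by
  induction f generalizing n with
  | zero => omega
  | succ f ih =>
    by_cases h : n > m
    · have hi : PySem.Int.floordiv n 2 = n / 2 := PySem.Int.floordiv_eq_ediv_of_pos (by omega)
      have h2 : 2 ≤ n := by omega
      have hib : 1 ≤ n / 2 ∧ n / 2 ≤ n - 1 := by omega
      have r1 := ih (n / 2) (by omega) (by omega)
      have r2 := ih (n - n / 2) (by omega) (by omega)
      simp only [pvSizesB, if_pos h, hi]
      constructor
      · intro sz hsz
        rcases List.mem_append.mp hsz with h' | h'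
        · exact r1.1 sz h'
        · exact r2.1 sz h'
      · simp [List.sum_append, r1.2, r2.2]
    · simp only [pvSizesB, if_neg h]
      exact ⟨by intro sz hsz; simp at hsz; omega, by simp⟩

theorem pvSliceBy_eq_splitN (xs : List String) (pos : Int) (sizes : List Int)
    (hpos : 0 ≤ pos) (hsz : ∀ sz ∈ sizes, 0 ≤ sz) :
    pvSliceBy xs pos sizes = pvSplitN (xs.drop pos.toNat) (sizes.map Int.toNat) := by
  induction sizes generalizing pos with
  | nil => simp [pvSliceBy, pvSplitN]
  | cons sz rest ih =>
    have h0 : 0 ≤ sz := hsz sz (by simp)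
    have hslice : PySem.List.slice xs (some pos) (some (pos + sz)) =
        (xs.drop pos.toNat).take ((pos + sz).toNat - pos.toNat) := by
      exact PySem.List.slice_toNat xs hpos (by omega)
    simp only [pvSliceBy, pvSplitN, List.map_cons, hslice]
    have h1 : (pos + sz).toNat - pos.toNat = sz.toNat := by omega
    have h2 : (xs.drop pos.toNat).drop sz.toNat = xs.drop (pos + sz).toNat := by
      rw [List.drop_drop]; congr 1; omega
    rw [h1, h2, ih (pos + sz) (by omega) (fun s hs => hsz s (by simp [hs]))]

theorem pvGoA_eq (f1 f2 : Nat) (s l : List String) (m : Int)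
    (hlen : s.length = l.length) (hm : 1 ≤ m ∨ (s.length : Int) ≤ m)
    (h1 : s.length < f1) (h2 : s.length < f2) :
    pvGoA f1 s l m = (pvSplitN s ((pvSizesB f2 (s.length : Int) m).map Int.toNat),
                      pvSplitN l ((pvSizesB f2 (s.length : Int) m).map Int.toNat)) := by
  induction f1 generalizing f2 s l with
  | zero => omega
  | succ f1 ih =>
    match f2, h2 with
    | f2 + 1, h2 =>
    by_cases h : (s.length : Int) > m
    · have hm1 : 1 ≤ m := by rcases hm with h' | h'; exact h'; omega
      have hlen2 : 2 ≤ s.length := by omega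
      have hi : PySem.Int.floordiv (s.length : Int) 2 = ((s.length / 2 : Nat) : Int) := by
        rw [PySem.Int.floordiv_eq_ediv_of_pos (by omega)]; omega
      set i : Nat := s.length / 2 with hidef
      have hib : 1 ≤ i ∧ i ≤ s.length - 1 := by omega
      -- sizes decomposition
      have hsz : pvSizesB (f2 + 1) (s.length : Int) m =
          pvSizesB f2 (i : Int) m ++ pvSizesB f2 ((s.length : Int) - i) m := by
        simp only [pvSizesB, if_pos h, hi]
      -- slices are take/drop
      have hs1 : PySem.List.slice s none (some ((i : Nat) : Int)) = s.take i :=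
        PySem.List.slice_to_natCast s i
      have hl1 : PySem.List.slice l none (some ((i : Nat) : Int)) = l.take i :=
        PySem.List.slice_to_natCast l i
      have hs2 : PySem.List.slice s (some ((i : Nat) : Int)) none = s.drop i :=
        PySem.List.slice_from_natCast s i
      have hl2 : PySem.List.slice l (some ((i : Nat) : Int)) none = l.drop i :=
        PySem.List.slice_from_natCast l i
      have hlen1 : (s.take i).length = i := by simp; omega
      have r1 := ih f2 (s.take i) (l.take i)
        (by simp; omega) (Or.inl hm1) (by simp; omega) (by simp; omega)
      have r2 := ih f2 (s.drop i) (l.drop i)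
        (by simp; omega) (Or.inl hm1) (by simp; omega) (by simp; omega)
      have sz1 := pvSizesB_nonneg f2 (i : Int) m hm1 (by omega) (by omega)
      have sz2 := pvSizesB_nonneg f2 ((s.length : Int) - i) m hm1 (by omega) (by omega)
      have hsum1 : ((pvSizesB f2 (i : Int) m).map Int.toNat).sum = i := by
        have h' := pvSum_toNat _ sz1.1
        rw [sz1.2] at h'; omega
      have hcast : ((s.take i).length : Int) = (i : Int) := by rw [hlen1]
      have hcast2 : ((s.drop i).length : Int) = (s.length : Int) - i := by simp; omega
      rw [hcast] at r1
      rw [hcast2] at r2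
      simp only [pvGoA, if_pos h, hi, hs1, hl1, hs2, hl2, r1, r2, hsz, List.map_append,
        pvSplitN_append, hsum1, Prod.mk.injEq]
      constructor
      · rw [pvSplitN_take s _ i hsum1.le]
      · rw [pvSplitN_take l _ i hsum1.le]
    · simp only [pvGoA, pvSizesB, if_neg h, List.map_cons, List.map_nil, pvSplitN,
        Int.toNat_natCast]
      rw [List.take_of_length_le le_rfl, hlen, List.take_of_length_le le_rfl]

-- ===== VERDICT (by name: the statement is the Claim_ definition above) =====
theorem enforce_max_sent_per_chunk_spec : Claim_equal_enforce_max_sent_per_chunk := by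
  intro s l m _ hpre
  obtain ⟨hlen, hm⟩ := hpre
  have hnn : ∀ sz ∈ pvSizesB (s.length + 1) (s.length : Int) m, 0 ≤ sz := by
    rcases hm with h' | h'
    · exact (pvSizesB_nonneg (s.length + 1) (s.length : Int) m h' (by omega) (by omega)).1
    · intro sz hsz
      simp only [pvSizesB, if_neg (by omega : ¬((s.length : Int) > m))] at hsz
      simp at hsz; omega
  unfold Spec_enforce_max_sent_per_chunk enforce_max_sent_per_chunk enforce_max_sent_per_chunk_alt
  rw [pvGoA_eq (s.length + 1) (s.length + 1) s l m hlen hm (by omega) (by omega)]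
  show _ = (pvSliceBy s 0 (pvSizesAcc (s.length + 1) (s.length : Int) m []),
            pvSliceBy l 0 (pvSizesAcc (s.length + 1) (s.length : Int) m []))
  rw [pvSizesAcc_eq, List.nil_append]
  rw [pvSliceBy_eq_splitN s 0 _ le_rfl hnn, pvSliceBy_eq_splitN l 0 _ le_rfl hnn]
  simp
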